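-- pv_equiv track=rewrite | github.com/kguzek/coursework-wust | js/lab3/log_analyzer.py | log_to_dict
-- ===== SOURCE A (Python) =====
-- def entry_to_dict(entry):
--     return {
--         "ts": entry[0],
--         "uid": entry[1],
--         "ip": entry[2],
--         "port": entry[3],
--         "resp_h": entry[4],
--         "resp_p": entry[5],
--         "method": entry[6],
--         "host": entry[7],
--         "uri": entry[8],
--         "code": entry[9],
--     }
--
-- def log_to_dict(entries):
--     result = {}
--     for entry in entries:
--         uid = entry[1]
--         entry_dict = entry_to_dict(entry)
--         if uid not in result:
--             result[uid] = []
--         result[uid].append(entry_dict)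
--     return result
-- ===== SOURCE B (Python) =====
-- def entry_to_dict(entry):
--     return {
--         "ts": entry[0],
--         "uid": entry[1],
--         "ip": entry[2],
--         "port": entry[3],
--         "resp_h": entry[4],
--         "resp_p": entry[5],
--         "method": entry[6],
--         "host": entry[7],
--         "uri": entry[8],
--         "code": entry[9],
--     }
--
-- def log_to_dict(entries):
--     uids = dict.fromkeys(entry[1] for entry in entries)
--     return {uid: [entry_to_dict(e) for e in entries if e[1] == uid]
--             for uid in uids}
-- ===== Notes on version B (the rewrite author's own statement) =====
-- stated objective: alternative
-- what changed: Replaces the incremental dict-mutation loop (create-bucket-if-missing then append) by a two-pass comprehension: ordered-dedup of uids via dict.fromkeys, then one filtering list comprehension per uid.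
import Mathlib
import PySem

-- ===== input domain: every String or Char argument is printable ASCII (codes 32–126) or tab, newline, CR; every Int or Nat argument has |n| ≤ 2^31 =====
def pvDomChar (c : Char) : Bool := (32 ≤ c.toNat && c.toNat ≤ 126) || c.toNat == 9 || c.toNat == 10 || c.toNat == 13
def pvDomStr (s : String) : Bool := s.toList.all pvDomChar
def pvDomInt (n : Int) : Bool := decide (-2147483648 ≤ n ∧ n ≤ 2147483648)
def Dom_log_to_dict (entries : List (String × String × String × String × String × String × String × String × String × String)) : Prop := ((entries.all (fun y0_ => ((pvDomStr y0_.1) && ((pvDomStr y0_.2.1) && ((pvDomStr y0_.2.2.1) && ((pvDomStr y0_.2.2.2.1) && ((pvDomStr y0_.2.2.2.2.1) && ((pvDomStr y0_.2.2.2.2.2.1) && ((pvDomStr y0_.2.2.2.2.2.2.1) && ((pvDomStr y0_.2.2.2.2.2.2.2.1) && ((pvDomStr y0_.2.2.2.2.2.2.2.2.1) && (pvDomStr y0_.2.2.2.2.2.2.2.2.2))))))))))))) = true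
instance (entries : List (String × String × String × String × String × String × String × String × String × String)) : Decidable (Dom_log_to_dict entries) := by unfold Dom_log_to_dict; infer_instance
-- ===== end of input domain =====

-- ===== PORT A =====
-- B changes decomposition only (dedup-then-filter comprehension instead of incremental dict mutation); objective: alternative, same values.
def entryToDict (e : String × String × String × String × String × String × String × String × String × String) : List (String × String) :=
  [("ts", e.1), ("uid", e.2.1), ("ip", e.2.2.1), ("port", e.2.2.2.1),
   ("resp_h", e.2.2.2.2.1), ("resp_p", e.2.2.2.2.2.1), ("method", e.2.2.2.2.2.2.1),
   ("host", e.2.2.2.2.2.2.2.1), ("uri", e.2.2.2.2.2.2.2.2.1), ("code", e.2.2.2.2.2.2.2.2.2)]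

def log_to_dict (entries : List (String × String × String × String × String × String × String × String × String × String)) : List (String × List (List (String × String))) :=
  (entries.foldl (fun result e =>
      let uid := e.2.1
      let entryDict := entryToDict e
      let result := if result.contains uid then result else result.insert uid []
      result.modify uid [] (fun l => l ++ [entryDict]))
    PySem.Dict.empty).items

-- ===== PORT B =====
def log_to_dict_alt (entries : List (String × String × String × String × String × String × String × String × String × String)) : List (String × List (List (String × String))) :=
  let uids := PySem.List.dedup (entries.map (fun e => e.2.1))
  uids.map (fun uid => (uid, (entries.filter (fun e => e.2.1 == uid)).map entryToDict))

-- ===== PRECONDITION & SPEC =====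
def Spec_log_to_dict (entries : List (String × String × String × String × String × String × String × String × String × String)) (out : List (String × List (List (String × String)))) : Prop := out = log_to_dict_alt entries
instance (entries : List (String × String × String × String × String × String × String × String × String × String)) (out : List (String × List (List (String × String)))) : Decidable (Spec_log_to_dict entries out) := by unfold Spec_log_to_dict; infer_instance

-- ===== CLAIM (what is proved, stated in full; the proofs are below) =====
def Claim_equal_log_to_dict : Prop := ∀ (entries : List (String × String × String × String × String × String × String × String × String × String)), Dom_log_to_dict entries → Spec_log_to_dict entries (log_to_dict entries)

-- ===== LEMMAS AND PROOFS =====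

-- The loop body of A: the "create empty bucket if missing, then append" step is exactly Dict.modify.
theorem step_eq_modify (d : PySem.Dict String (List (List (String × String)))) (e : String × String × String × String × String × String × String × String × String × String) :
    (let uid := e.2.1
     let entryDict := entryToDict e
     let result := if d.contains uid then d else d.insert uid []
     result.modify uid [] (fun l => l ++ [entryDict]))
    = d.modify e.2.1 [] (fun l => l ++ [entryToDict e]) := by
  by_cases h : d.contains e.2.1
  · simp [h]
  · have h' : d.contains e.2.1 = false := by simpa using h
    simp [PySem.Dict.modify, h', PySem.Dict.getD_insert_self,
      PySem.Dict.insert_insert_self, PySem.Dict.getD_of_not_contains _ _ h']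

theorem fold_eq_modify_fold (entries : List (String × String × String × String × String × String × String × String × String × String)) :
    entries.foldl (fun result e =>
      let uid := e.2.1
      let entryDict := entryToDict e
      let result := if result.contains uid then result else result.insert uid []
      result.modify uid [] (fun l => l ++ [entryDict])) PySem.Dict.empty
    = entries.foldl (fun d e => d.modify e.2.1 [] (fun l => l ++ [entryToDict e])) PySem.Dict.empty := by
  exact PySem.List.foldl_congr_mem _ _ _ _ (fun d e _ => step_eq_modify d e)

theorem getD_fold (entries : List (String × String × String × String × String × String × String × String × String × String)) (u : String) :
    (entries.foldl (fun d e => d.modify e.2.1 [] (fun l => l ++ [entryToDict e])) PySem.Dict.empty).getD u []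
    = (entries.filter (fun e => e.2.1 == u)).map entryToDict := by
  have h : entries.foldl (fun d e => d.modify e.2.1 [] (fun l => l ++ [entryToDict e])) PySem.Dict.empty
      = (entries.map (fun e => (e.2.1, entryToDict e))).foldl
          (fun d p => d.modify p.1 [] (fun l => l ++ [p.2])) PySem.Dict.empty := by
    rw [List.foldl_map]
  rw [h, PySem.Dict.getD_foldl_modify_append]
  simp [List.filter_map, Function.comp_def]

-- ===== VERDICT (by name: the statement is the Claim_ definition above) =====
theorem log_to_dict_spec : Claim_equal_log_to_dict := by
  intro entries _
  unfold Spec_log_to_dict log_to_dict log_to_dict_alt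
  rw [fold_eq_modify_fold]
  set F := fun (d : PySem.Dict String (List (List (String × String)))) (e : String × String × String × String × String × String × String × String × String × String) =>
    d.modify e.2.1 [] (fun l => l ++ [entryToDict e]) with hF
  have hnodup : (entries.foldl F PySem.Dict.empty).keys.Nodup := by
    apply PySem.Dict.nodup_keys_foldl_modify_key entries (fun e => e.2.1) []
      (fun d e => fun l => l ++ [entryToDict e])
    simp [PySem.Dict.keys_empty]
  rw [PySem.Dict.items_eq_map_keys _ hnodup []]
  have hkeys : (entries.foldl F PySem.Dict.empty).keys
      = PySem.List.dedup (entries.map (fun e => e.2.1)) := by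
    rw [hF, PySem.Dict.keys_foldl_modify_key entries (fun e => e.2.1) []
      (fun d e => fun l => l ++ [entryToDict e])]
    simp [PySem.Dict.keys_empty, PySem.Set.update_nil_left, PySem.List.dedup]
  rw [hkeys]
  exact List.map_congr_left (fun u _ => by rw [getD_fold])
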